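-- pv_equiv track=rewrite | github.com/damienmarsic/dmbiolib | build/lib/dmbiolib.py | check_seq
-- ===== SOURCE A (Python) =====
-- def check_seq(seq,type,required):
--     t=True
--     req=False
--     seq=seq.lower()
--     type=type.lower()
--     required=required.lower()
--     for i in seq:
--         if i not in type:
--             t=False
--             break
--         if i in required:
--             req=True
--     return t,req
-- ===== SOURCE B (Python) =====
-- def check_seq(seq, type, required):
--     s = seq.lower()
--     ty = type.lower()
--     rq = required.lower()
--     n = len(s)
--     bad = next((i for i, c in enumerate(s) if c not in ty), n)
--     prefix = s[:bad]
--     return (bad == n, any(c in rq for c in prefix))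
-- ===== Notes on version B (the rewrite author's own statement) =====
-- stated objective: alternative
-- what changed: A interleaves validity and required-presence in one early-break loop; B first locates the first invalid character's index, then checks validity by comparing it to len(seq) and scans only that prefix for required characters.
import Mathlib
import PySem

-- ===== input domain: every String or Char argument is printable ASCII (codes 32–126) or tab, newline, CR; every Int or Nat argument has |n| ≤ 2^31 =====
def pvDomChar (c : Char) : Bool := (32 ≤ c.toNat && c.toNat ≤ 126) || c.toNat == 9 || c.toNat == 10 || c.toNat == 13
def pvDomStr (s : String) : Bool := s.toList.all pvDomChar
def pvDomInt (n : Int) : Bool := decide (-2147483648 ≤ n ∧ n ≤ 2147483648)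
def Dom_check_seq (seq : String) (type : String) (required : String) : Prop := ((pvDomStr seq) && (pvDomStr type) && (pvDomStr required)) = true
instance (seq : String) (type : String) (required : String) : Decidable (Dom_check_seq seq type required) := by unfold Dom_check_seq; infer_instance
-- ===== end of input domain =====

-- B replaces A's single early-break loop by a find-first-invalid-index step followed by a prefix scan (alternative decomposition, same cost).


-- ===== PORT A =====
-- early-break loop: t,req accumulators; break sets t=False and stops
def checkSeqLoopA (ty rq : List Char) : List Char → Bool → Bool → Bool × Bool
  | [], t, req => (t, req)
  | c :: rest, t, req =>
      if !(ty.contains c) then (false, req)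
      else checkSeqLoopA ty rq rest t (if rq.contains c then true else req)

def check_seq (seq : String) (type : String) (required : String) : Bool × Bool :=
  let s := (PySem.Str.lower seq).toList
  let ty := (PySem.Str.lower type).toList
  let rq := (PySem.Str.lower required).toList
  checkSeqLoopA ty rq s true false

-- ===== PORT B =====
-- B: index of first invalid char (or n), then validity = (bad == n), req = any over that prefix
def check_seq_alt (seq : String) (type : String) (required : String) : Bool × Bool :=
  let s := (PySem.Str.lower seq).toList
  let ty := (PySem.Str.lower type).toList
  let rq := (PySem.Str.lower required).toList
  let n := s.length
  let bad := (s.findIdx? (fun c => !(ty.contains c))).getD n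
  let pre := s.take bad
  (bad == n, pre.any (fun c => rq.contains c))

-- ===== PRECONDITION & SPEC =====
def Spec_check_seq (seq : String) (type : String) (required : String) (out : Bool × Bool) : Prop := out = check_seq_alt seq type required
instance (seq : String) (type : String) (required : String) (out : Bool × Bool) : Decidable (Spec_check_seq seq type required out) := by unfold Spec_check_seq; infer_instance

-- ===== CLAIM (what is proved, stated in full; the proofs are below) =====
def Claim_equal_check_seq : Prop := ∀ (seq : String) (type : String) (required : String), Dom_check_seq seq type required → Spec_check_seq seq type required (check_seq seq type required)

-- ===== LEMMAS AND PROOFS =====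
theorem checkSeqLoopA_eq (ty rq : List Char) (s : List Char) :
    ∀ (t req : Bool), checkSeqLoopA ty rq s t req =
      match s.findIdx? (fun c => !(ty.contains c)) with
      | none => (t, req || s.any (fun c => rq.contains c))
      | some i => (false, req || (s.take i).any (fun c => rq.contains c)) := by
  induction s with
  | nil => intro t req; simp [checkSeqLoopA]
  | cons c rest ih =>
    intro t req
    rw [checkSeqLoopA, List.findIdx?_cons]
    cases h : ty.contains c with
    | false =>
      simp only [h, Bool.not_false]
      simp
    | true =>
      simp only [Bool.not_true]
      rw [if_neg (by simp), ih]
      cases hf : rest.findIdx? (fun c => !(ty.contains c)) with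
      | none =>
        simp only [List.any_cons]
        cases req <;> cases hq : rq.contains c <;> simp_all
      | some i =>
        simp only [Option.map_some, List.any_cons]
        cases req <;> cases hq : rq.contains c <;> simp_all

theorem findIdx?_lt_length_of_some {α : Type} {p : α → Bool} {s : List α} {i : Nat}
    (h : s.findIdx? p = some i) : i < s.length :=
  (List.findIdx?_eq_some_iff_findIdx_eq.mp h).1

-- ===== VERDICT (by name: the statement is the Claim_ definition above) =====
theorem check_seq_spec : Claim_equal_check_seq := by
  intro seq type required _
  unfold Spec_check_seq check_seq check_seq_alt
  rw [checkSeqLoopA_eq]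
  cases hf : ((PySem.Str.lower seq).toList.findIdx?
      (fun c => !(((PySem.Str.lower type).toList).contains c))) with
  | none =>
    simp only [hf, Option.getD_none]
    rw [List.take_length]
    simp
  | some i =>
    have hi := findIdx?_lt_length_of_some hf
    simp only [hf, Option.getD_some]
    have hne : (i == (PySem.Str.lower seq).toList.length) = false := by
      simp only [beq_eq_false_iff_ne, ne_eq]; omega
    rw [hne, Bool.false_or]
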